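-- pv_equiv track=rewrite | github.com/quaesito/2048_game | game_logic.py | get_corner_strategy_score
-- ===== SOURCE A (Python) =====
-- def get_corner_strategy_score(board):
--     """Rewards keeping the largest tile in a corner."""
--     max_tile = 0
--     max_positions = []
--
--     # Find all positions with the maximum tile value
--     for r in range(len(board)):
--         for c in range(len(board[r])):
--             if board[r][c] is not None and board[r][c] > max_tile:
--                 max_tile = board[r][c]
--                 max_positions = [(r, c)]
--             elif board[r][c] is not None and board[r][c] == max_tile:
--                 max_positions.append((r, c))
--
--     if not max_positions:
--         return 0
--
--     # Check if any max tile is in a corner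
--     corners = [(0, 0), (0, len(board[0]) - 1), (len(board) - 1, 0), (len(board) - 1, len(board[0]) - 1)]
--     for pos in max_positions:
--         if pos in corners:
--             return max_tile * 2  # Bonus for corner placement
--
--     return 0
-- ===== SOURCE B (Python) =====
-- def get_corner_strategy_score(board):
--     """Rewards keeping the largest tile in a corner."""
--     values = [v for row in board for v in row if v is not None]
--     mx = max(values, default=0)
--     if mx <= 0:
--         return 0
--     nrows = len(board)
--     lc = len(board[0]) - 1
--     for r, c in ((0, 0), (0, lc), (nrows - 1, 0), (nrows - 1, lc)):
--         if 0 <= c < len(board[r]) and board[r][c] == mx: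
--             return mx * 2
--     return 0
-- ===== Notes on version B (the rewrite author's own statement) =====
-- stated objective: simpler
-- what changed: A tracks every position of the running maximum during the scan and then tests each collected position for membership in a corner list; B computes the maximum of the non-None values once (default 0, returning 0 early when it is not positive) and then directly probes the four corner coordinates with bounds guards.
import Mathlib
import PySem

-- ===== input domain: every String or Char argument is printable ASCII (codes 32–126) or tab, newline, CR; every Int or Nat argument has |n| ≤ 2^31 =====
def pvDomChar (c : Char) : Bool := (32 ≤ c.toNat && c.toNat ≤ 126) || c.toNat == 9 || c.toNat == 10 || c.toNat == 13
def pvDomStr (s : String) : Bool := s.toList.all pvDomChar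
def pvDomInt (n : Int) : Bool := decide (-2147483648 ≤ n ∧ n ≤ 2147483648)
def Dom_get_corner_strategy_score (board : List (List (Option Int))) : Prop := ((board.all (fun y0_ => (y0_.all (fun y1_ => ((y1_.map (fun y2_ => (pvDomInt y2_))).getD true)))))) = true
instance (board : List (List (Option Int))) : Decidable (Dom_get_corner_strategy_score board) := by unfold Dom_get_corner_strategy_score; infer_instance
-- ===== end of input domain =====

-- B replaces A's argmax-position bookkeeping (collect every position of the running maximum,
-- then test membership in a corner list) by a two-phase check: compute the maximum once, then
-- look directly at the four corner cells.  Objective: simpler.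

-- ===== PORT A =====
-- Literal port of A: nested index loops become folds over enumerate carrying
-- (max_tile, max_positions); `len(board[0])` is reached only when max_positions ≠ [],
-- hence board ≠ [], so `board.headD []` is exact there.
def get_corner_strategy_score (board : List (List (Option Int))) : Int :=
  let st :=
    (PySem.List.enumerate board 0).foldl (fun st rrow =>
      (PySem.List.enumerate rrow.2 0).foldl (fun st2 ccell =>
        match ccell.2 with
        | some v =>
          if v > st2.1 then (v, [(rrow.1, ccell.1)])
          else if v = st2.1 then (st2.1, st2.2 ++ [(rrow.1, ccell.1)])
          else st2
        | none => st2) st)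
      ((0 : Int), ([] : List (Int × Int)))
  if st.2 = [] then 0
  else
    let corners : List (Int × Int) :=
      [(0, 0), (0, ((board.headD []).length : Int) - 1),
       ((board.length : Int) - 1, 0),
       ((board.length : Int) - 1, ((board.headD []).length : Int) - 1)]
    if st.2.any (fun p => corners.contains p) then st.1 * 2 else 0

-- ===== PORT B =====
-- Literal port of B (Source B): flat list of non-None values, max with default 0, then the four
-- guarded corner probes.  `board[0]` / `board[r]` are reached only when mx > 0 (board ≠ [],
-- r ∈ {0, nrows-1}), so `.getD []` is exact there.
def get_corner_strategy_score_alt (board : List (List (Option Int))) : Int :=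
  let values := board.flatMap (fun row => row.filterMap id)
  let mx := PySem.List.maxD values (fun v => v) 0
  if mx ≤ 0 then 0
  else
    let nrows : Int := board.length
    let lc : Int := ((board.headD []).length : Int) - 1
    if [((0 : Int), (0 : Int)), (0, lc), (nrows - 1, 0), (nrows - 1, lc)].any (fun rc =>
        let row := (PySem.List.pyGet? board rc.1).getD []
        decide (0 ≤ rc.2) && decide (rc.2 < (row.length : Int)) &&
          (PySem.List.pyGet? row rc.2 == some (some mx)))
    then mx * 2 else 0

-- ===== PRECONDITION & SPEC =====
def Spec_get_corner_strategy_score (board : List (List (Option Int))) (out : Int) : Prop := out = get_corner_strategy_score_alt board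
instance (board : List (List (Option Int))) (out : Int) : Decidable (Spec_get_corner_strategy_score board out) := by unfold Spec_get_corner_strategy_score; infer_instance

-- ===== CLAIM (what is proved, stated in full; the proofs are below) =====
def Claim_equal_get_corner_strategy_score : Prop := ∀ (board : List (List (Option Int))), Dom_get_corner_strategy_score board → Spec_get_corner_strategy_score board (get_corner_strategy_score board)

-- ===== LEMMAS AND PROOFS =====

-- A's loop body on one (position, cell) pair.
def pvStep (st : Int × List (Int × Int)) (x : (Int × Int) × Option Int) : Int × List (Int × Int) :=
  match x.2 with
  | some v => if v > st.1 then (v, [x.1]) else if v = st.1 then (st.1, st.2 ++ [x.1]) else st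
  | none => st

-- The board flattened to ((r, c), cell) in row-major order.
def pvFlat (board : List (List (Option Int))) : List ((Int × Int) × Option Int) :=
  (PySem.List.enumerate board 0).flatMap (fun rrow =>
    (PySem.List.enumerate rrow.2 0).map (fun ccell => ((rrow.1, ccell.1), ccell.2)))

def pvVals (board : List (List (Option Int))) : List Int :=
  board.flatMap (fun row => row.filterMap id)

def pvMv (board : List (List (Option Int))) : Int := (pvVals board).foldl max 0

def pvPos (board : List (List (Option Int))) : List (Int × Int) :=
  ((pvFlat board).filter (fun x => x.2 == some (pvMv board))).map Prod.fst

-- running max over the flat list, reading only the cell values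
def pvM (l : List ((Int × Int) × Option Int)) (m : Int) : Int :=
  l.foldl (fun a x => match x.2 with | some v => max a v | none => a) m

lemma le_pvM (l : List ((Int × Int) × Option Int)) : ∀ m : Int, m ≤ pvM l m := by
  induction l with
  | nil => intro m; simp [pvM]
  | cons x l ih =>
    intro m
    rcases x with ⟨p, cell⟩
    cases cell with
    | none => simpa [pvM] using ih m
    | some v =>
      have h := ih (max m v)
      simp only [pvM, List.foldl_cons] at h ⊢
      exact le_trans (le_max_left m v) h

lemma pvM_eq_filterMap (l : List ((Int × Int) × Option Int)) :
    ∀ m : Int, pvM l m = (l.filterMap Prod.snd).foldl max m := by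
  induction l with
  | nil => intro m; simp [pvM]
  | cons x l ih =>
    intro m
    rcases x with ⟨p, cell⟩
    cases cell with
    | none => simpa [pvM, List.filterMap_cons] using ih m
    | some v => simpa [pvM, List.filterMap_cons] using ih (max m v)

lemma foldl_pvStep (l : List ((Int × Int) × Option Int)) :
    ∀ (m : Int) (acc : List (Int × Int)), 0 ≤ m →
      l.foldl pvStep (m, acc) =
        (pvM l m, (if pvM l m = m then acc else []) ++
          ((l.filter (fun x => x.2 == some (pvM l m))).map Prod.fst)) := by
  induction l with
  | nil => intro m acc _; simp [pvM]
  | cons x l ih =>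
    intro m acc hm
    rcases x with ⟨p, cell⟩
    cases cell with
    | none =>
      have h := ih m acc hm
      simp only [pvM, List.foldl_cons, pvStep, List.filter_cons] at h ⊢
      simpa using h
    | some v =>
      simp only [List.foldl_cons, pvStep]
      by_cases hgt : v > m
      · rw [if_pos hgt]
        have h := ih v [p] (le_of_lt (lt_of_le_of_lt hm hgt))
        have hMv : pvM l v = pvM ((p, some v) :: l) m := by
          simp [pvM, max_eq_right (le_of_lt hgt)]
        have hne : pvM ((p, some v) :: l) m ≠ m := by
          have := le_pvM l v
          rw [hMv] at this; omega
        rw [h, hMv]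
        simp only [List.filter_cons, if_neg hne]
        by_cases hvM : v = pvM ((p, some v) :: l) m
        · simp [← hvM]
        · simp [Ne.symm hvM, hvM]
      · rw [if_neg hgt]
        have hMm : pvM ((p, some v) :: l) m = pvM l m := by
          simp [pvM, max_eq_left (not_lt.mp hgt)]
        by_cases heq : v = m
        · rw [if_pos heq]
          have h := ih m (acc ++ [p]) hm
          rw [h, hMm]
          by_cases hMeq : pvM l m = m
          · simp [hMeq, heq, List.append_assoc]
          · have hne : pvM l m ≠ v := by rw [heq]; exact hMeq
            simp [List.filter_cons, hMeq, Ne.symm hne]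
        · rw [if_neg heq]
          have h := ih m acc hm
          rw [h, hMm]
          have hlt : v < m := lt_of_le_of_ne (not_lt.mp hgt) heq
          have hne : pvM l m ≠ v := by have := le_pvM l m; omega
          simp [List.filter_cons, Ne.symm hne]

lemma pv_inner_snd (row : List (Option Int)) (ri : Int) :
    ∀ s : Int, ((PySem.List.enumerate row s).map
        (fun ccell => ((ri, ccell.1), ccell.2))).filterMap Prod.snd = row.filterMap id := by
  induction row with
  | nil => intro s; simp [PySem.List.enumerate_nil]
  | cons x row ih =>
    intro s
    cases x <;> simp [PySem.List.enumerate_cons, ih (s + 1)]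

lemma filterMap_snd_pvFlat (board : List (List (Option Int))) :
    (pvFlat board).filterMap Prod.snd = pvVals board := by
  suffices h : ∀ s : Int, ((PySem.List.enumerate board s).flatMap (fun rrow =>
      (PySem.List.enumerate rrow.2 0).map (fun ccell => ((rrow.1, ccell.1), ccell.2)))).filterMap
        Prod.snd = pvVals board from h 0
  induction board with
  | nil => intro s; simp [PySem.List.enumerate_nil, pvVals]
  | cons row board ih =>
    intro s
    simp only [PySem.List.enumerate_cons, List.flatMap_cons, List.filterMap_append, pvVals,
      List.flatMap_cons] at *
    rw [pv_inner_snd row s 0, ih (s + 1)]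

lemma mem_pvFlat (board : List (List (Option Int))) (ri ci : Int) (cell : Option Int) :
    ((ri, ci), cell) ∈ pvFlat board ↔
      ∃ (r c : Nat) (row : List (Option Int)),
        board[r]? = some row ∧ row[c]? = some cell ∧ ri = (r : Int) ∧ ci = (c : Int) := by
  simp only [pvFlat, List.mem_flatMap, PySem.List.mem_enumerate_iff, List.mem_map]
  constructor
  · rintro ⟨rrow, ⟨r, hr, rfl⟩, ⟨ccell, ⟨c, hc, rfl⟩, heq⟩⟩
    simp only [Prod.mk.injEq] at heq
    obtain ⟨⟨h1, h2⟩, h3⟩ := heq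
    exact ⟨r, c, board[r], by simp [hr], by simp [hc, h3], by omega, by omega⟩
  · rintro ⟨r, c, row, hrow, hcell, rfl, rfl⟩
    have hr : r < board.length := by
      by_contra h
      simp [List.getElem?_eq_none (by omega : board.length ≤ r)] at hrow
    have hrow' : board[r] = row := by simpa [List.getElem?_eq_getElem hr] using hrow
    have hc : c < row.length := by
      by_contra h
      simp [List.getElem?_eq_none (by omega : row.length ≤ c)] at hcell
    have hcell' : row[c] = cell := by simpa [List.getElem?_eq_getElem hc] using hcell
    refine ⟨((r : Int), board[r]), ⟨r, hr, by simp⟩,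
      ⟨((c : Int), cell), ⟨c, by simpa [hrow'] using hc, ?_⟩, by simp⟩⟩
    simp [hrow', hcell']

lemma mem_pvPos (board : List (List (Option Int))) (ri ci : Int) :
    (ri, ci) ∈ pvPos board ↔
      ∃ (r c : Nat) (row : List (Option Int)),
        board[r]? = some row ∧ row[c]? = some (some (pvMv board)) ∧
          ri = (r : Int) ∧ ci = (c : Int) := by
  simp only [pvPos, List.mem_map, List.mem_filter]
  constructor
  · rintro ⟨⟨p, cell⟩, ⟨hmem, hbeq⟩, hfst⟩
    simp only [beq_iff_eq] at hbeq
    subst hbeq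
    obtain rfl : p = (ri, ci) := hfst
    exact (mem_pvFlat board ri ci (some (pvMv board))).mp hmem
  · rintro ⟨r, c, row, h1, h2, rfl, rfl⟩
    exact ⟨(((r : Int), (c : Int)), some (pvMv board)),
      ⟨(mem_pvFlat board r c (some (pvMv board))).mpr ⟨r, c, row, h1, h2, rfl, rfl⟩, by simp⟩, rfl⟩

lemma A_eq (board : List (List (Option Int))) :
    get_corner_strategy_score board =
      if (pvPos board).any (fun p =>
          [((0 : Int), (0 : Int)), (0, ((board.headD []).length : Int) - 1),
           ((board.length : Int) - 1, 0),
           ((board.length : Int) - 1, ((board.headD []).length : Int) - 1)].contains p)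
      then pvMv board * 2 else 0 := by
  have hfold : (PySem.List.enumerate board 0).foldl (fun st rrow =>
      (PySem.List.enumerate rrow.2 0).foldl (fun st2 ccell =>
        match ccell.2 with
        | some v =>
          if v > st2.1 then (v, [(rrow.1, ccell.1)])
          else if v = st2.1 then (st2.1, st2.2 ++ [(rrow.1, ccell.1)])
          else st2
        | none => st2) st) ((0 : Int), ([] : List (Int × Int)))
      = (pvFlat board).foldl pvStep ((0 : Int), ([] : List (Int × Int))) := by
    rw [pvFlat, List.foldl_flatMap]
    congr 1
    funext st rrow
    rw [List.foldl_map]; rfl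
  have hM : pvM (pvFlat board) 0 = pvMv board := by
    rw [pvM_eq_filterMap, filterMap_snd_pvFlat]; rfl
  have hres : (pvFlat board).foldl pvStep ((0 : Int), ([] : List (Int × Int)))
      = (pvMv board, pvPos board) := by
    rw [foldl_pvStep (pvFlat board) 0 [] le_rfl, hM]
    simp [pvPos]
  rw [get_corner_strategy_score, hfold, hres]
  by_cases hp : pvPos board = []
  · simp [hp]
  · simp only [hp, if_neg]
    rfl

lemma pv_probe (board : List (List (Option Int))) (ri ci : Int) (r : Nat)
    (hr : (r : Int) = ri) (hlt : r < board.length) :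
    ((ri, ci) ∈ pvPos board) ↔
      (decide (0 ≤ ci) &&
       decide (ci < ((((PySem.List.pyGet? board ri).getD []) : List (Option Int)).length : Int)) &&
       (PySem.List.pyGet? ((PySem.List.pyGet? board ri).getD []) ci
          == some (some (pvMv board)))) = true := by
  subst hr
  have hget : PySem.List.pyGet? board (r : Int) = some board[r] := by
    rw [PySem.List.pyGet?_natCast]
    simp [List.getElem?_eq_getElem hlt]
  rw [mem_pvPos, hget]
  simp only [Option.getD_some, Bool.and_eq_true, decide_eq_true_eq, beq_iff_eq]
  constructor
  · rintro ⟨r', c, row, h1, h2, hr', rfl⟩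
    have hr'' : r' = r := by omega
    subst hr''
    have hrow : board[r'] = row := by simpa [List.getElem?_eq_getElem hlt] using h1
    have hc : c < row.length := List.getElem?_eq_some_iff.mp h2 |>.1
    subst hrow
    refine ⟨⟨by positivity, by exact_mod_cast hc⟩, ?_⟩
    rw [PySem.List.pyGet?_natCast]
    exact h2
  · rintro ⟨⟨h0, hlen⟩, hcell⟩
    refine ⟨r, ci.toNat, board[r], by simp [List.getElem?_eq_getElem hlt], ?_, rfl, by omega⟩
    rw [PySem.List.pyGet?_of_nonneg _ h0] at hcell
    exact hcell

lemma pv_any_eq (board : List (List (Option Int))) (hb : board ≠ []) :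
    (pvPos board).any (fun p =>
        [((0 : Int), (0 : Int)), (0, ((board.headD []).length : Int) - 1),
         ((board.length : Int) - 1, 0),
         ((board.length : Int) - 1, ((board.headD []).length : Int) - 1)].contains p)
    = [((0 : Int), (0 : Int)), (0, ((board.headD []).length : Int) - 1),
       ((board.length : Int) - 1, 0),
       ((board.length : Int) - 1, ((board.headD []).length : Int) - 1)].any (fun rc =>
        let row := (PySem.List.pyGet? board rc.1).getD []
        decide (0 ≤ rc.2) && decide (rc.2 < (row.length : Int)) &&
          (PySem.List.pyGet? row rc.2 == some (some (pvMv board)))) := by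
  have hlen : 0 < board.length := List.length_pos_iff.mpr hb
  have hlast : ((board.length - 1 : Nat) : Int) = (board.length : Int) - 1 := by omega
  rw [Bool.eq_iff_iff]
  simp only [List.any_eq_true, List.contains_eq_mem, List.mem_cons,
    List.not_mem_nil, or_false, decide_eq_true_eq]
  constructor
  · rintro ⟨p, hp, h1 | h2 | h3 | h4⟩
    · exact ⟨_, Or.inl rfl, by
        have := (pv_probe board 0 0 0 rfl hlen).mp (h1 ▸ hp); simpa using this⟩
    · exact ⟨_, Or.inr (Or.inl rfl), by
        have := (pv_probe board 0 _ 0 rfl hlen).mp (h2 ▸ hp); simpa using this⟩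
    · exact ⟨_, Or.inr (Or.inr (Or.inl rfl)), by
        have := (pv_probe board _ 0 (board.length - 1) hlast (by omega)).mp (h3 ▸ hp)
        simpa using this⟩
    · exact ⟨_, Or.inr (Or.inr (Or.inr rfl)), by
        have := (pv_probe board _ _ (board.length - 1) hlast (by omega)).mp (h4 ▸ hp)
        simpa using this⟩
  · rintro ⟨rc, h1 | h2 | h3 | h4, htest⟩
    · subst h1
      exact ⟨_, (pv_probe board 0 0 0 rfl hlen).mpr (by simpa using htest), Or.inl rfl⟩
    · subst h2
      exact ⟨_, (pv_probe board 0 _ 0 rfl hlen).mpr (by simpa using htest),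
        Or.inr (Or.inl rfl)⟩
    · subst h3
      exact ⟨_, (pv_probe board _ 0 (board.length - 1) hlast (by omega)).mpr
        (by simpa using htest), Or.inr (Or.inr (Or.inl rfl))⟩
    · subst h4
      exact ⟨_, (pv_probe board _ _ (board.length - 1) hlast (by omega)).mpr
        (by simpa using htest), Or.inr (Or.inr (Or.inr rfl))⟩

-- ===== VERDICT (by name: the statement is the Claim_ definition above) =====
theorem get_corner_strategy_score_spec : Claim_equal_get_corner_strategy_score := by
  intro board _
  unfold Spec_get_corner_strategy_score
  rw [A_eq board]
  simp only [get_corner_strategy_score_alt]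
  cases hv : board.flatMap (fun row => row.filterMap id) with
  | nil =>
    have hM0 : pvMv board = 0 := by unfold pvMv pvVals; rw [hv]; rfl
    rw [hM0]
    simp [PySem.List.maxD, PySem.List.max?]
  | cons x t =>
    have hmx : PySem.List.maxD (x :: t) (fun v => v) 0 = t.foldl max x := by
      simp [PySem.List.maxD, PySem.List.max?_id_cons]
    rw [hmx]
    have hMv : pvMv board = max 0 (t.foldl max x) := by
      unfold pvMv pvVals
      rw [hv, List.foldl_cons]
      exact List.foldl_assoc
    by_cases h1 : t.foldl max x ≤ 0
    · rw [if_pos h1]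
      have hM0 : pvMv board = 0 := by rw [hMv]; exact max_eq_left h1
      simp [hM0]
    · rw [if_neg h1]
      push_neg at h1
      have hM1 : pvMv board = t.foldl max x := by
        rw [hMv]; exact max_eq_right (le_of_lt h1)
      have hb : board ≠ [] := by rintro rfl; simp at hv
      rw [← hM1, pv_any_eq board hb]
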